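-- pv_equiv track=rewrite | github.com/aepaysinger/code-challenges | code_challenges/code_wars/delete_extra.py | delete_extra
-- ===== SOURCE A (Python) =====
-- def delete_extra(alist, amount):
--     updated = []
--     count = {}
--     for item in alist:
--         if item not in count:
--             count[item] = 1
--         else:
--             count[item] += 1
--         if count[item] <= amount:
--             updated.append(item)
--     return updated
-- ===== SOURCE B (Python) =====
-- def delete_extra(alist, amount):
--     if amount <= 0:
--         return []
--     kept = []
--     for x in sorted(set(alist)):
--         kept.extend([i for i, y in enumerate(alist) if y == x][:amount])
--     kept.sort()
--     return [alist[i] for i in kept]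
-- ===== Notes on version B (the rewrite author's own statement) =====
-- stated objective: alternative
-- what changed: Replaced A's single pass with a running count dictionary by a staged group-by algorithm: for each distinct value collect its index list, truncate it to the first 'amount' positions, merge all kept indices by sorting, and gather the elements back from the original list.
import Mathlib
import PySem

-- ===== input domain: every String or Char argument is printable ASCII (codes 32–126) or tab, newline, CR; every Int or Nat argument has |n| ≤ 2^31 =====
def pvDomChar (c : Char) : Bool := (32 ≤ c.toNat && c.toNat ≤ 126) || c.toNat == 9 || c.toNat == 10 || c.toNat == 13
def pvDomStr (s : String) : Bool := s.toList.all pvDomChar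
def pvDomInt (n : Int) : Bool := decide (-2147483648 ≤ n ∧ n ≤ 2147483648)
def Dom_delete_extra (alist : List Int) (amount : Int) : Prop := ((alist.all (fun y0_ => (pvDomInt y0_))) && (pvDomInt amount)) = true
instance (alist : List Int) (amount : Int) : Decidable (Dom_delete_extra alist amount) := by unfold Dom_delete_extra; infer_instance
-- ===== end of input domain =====

-- B replaces A's one-pass running-count dictionary by a staged group-by: per distinct value collect and truncate its index list, sort the merged indices, gather; alternative decomposition, not faster.


-- ===== PORT A =====
-- literal transliteration of A: fold over alist carrying (updated, count dict)
def delete_extra (alist : List Int) (amount : Int) : List Int :=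
  (alist.foldl
    (fun (st : List Int × PySem.Dict Int Int) item =>
      let count :=
        if st.2.contains item = false then st.2.insert item 1
        else st.2.insert item (st.2.getD item 0 + 1)
      let updated := if count.getD item 0 ≤ amount then st.1 ++ [item] else st.1
      (updated, count))
    ([], PySem.Dict.empty)).1

-- ===== PORT B =====
-- if amount <= 0: return []
-- kept = []; for x in sorted(set(alist)): kept.extend([i for i, y in enumerate(alist) if y == x][:amount])
-- kept.sort(); return [alist[i] for i in kept]
def delete_extra_alt (alist : List Int) (amount : Int) : List Int :=
  if amount ≤ 0 then []
  else
    let kept :=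
      (PySem.List.sorted (PySem.Set.ofList alist) (fun v => v) false).foldl
        (fun kept x =>
          kept ++ PySem.List.slice
            ((PySem.List.enumerate alist 0).filterMap
              (fun p => if p.2 == x then some p.1 else none))
            none (some amount))
        []
    (PySem.List.sorted kept (fun v => v) false).map
      (fun i => (PySem.List.pyGet? alist i).getD 0)

-- ===== PRECONDITION & SPEC =====
def Spec_delete_extra (alist : List Int) (amount : Int) (out : List Int) : Prop := out = delete_extra_alt alist amount
instance (alist : List Int) (amount : Int) (out : List Int) : Decidable (Spec_delete_extra alist amount out) := by unfold Spec_delete_extra; infer_instance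

-- ===== CLAIM (what is proved, stated in full; the proofs are below) =====
def Claim_equal_delete_extra : Prop := ∀ (alist : List Int) (amount : Int), Dom_delete_extra alist amount → Spec_delete_extra alist amount (delete_extra alist amount)

-- ===== LEMMAS AND PROOFS =====
def canonF (l : List Int) (amount : Int) : Nat → Bool :=
  fun i => decide (((l.take i).count (l.getD i 0) : Int) < amount)
def canonIdx (l : List Int) (amount : Int) : List Nat :=
  (List.range l.length).filter (canonF l amount)
def canonMap (l : List Int) (amount : Int) : List Int :=
  (canonIdx l amount).map (fun i => l.getD i 0)

theorem canonMap_append (l : List Int) (x : Int) (amount : Int) :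
    canonMap (l ++ [x]) amount
      = canonMap l amount ++ (if ((l.count x : Int) < amount) then [x] else []) := by
  unfold canonMap canonIdx
  have hlen : (l ++ [x]).length = l.length + 1 := by simp
  rw [hlen, List.range_succ, List.filter_append, List.map_append]
  have hsame : ∀ i, i < l.length →
      ((l ++ [x]).take i = l.take i ∧ (l ++ [x]).getD i 0 = l.getD i 0) := by
    intro i hi
    exact ⟨List.take_append_of_le_length (by omega), List.getD_append l [x] 0 i hi⟩
  congr 1
  · -- first block
    have hf : (List.range l.length).filter (canonF (l ++ [x]) amount)
        = (List.range l.length).filter (canonF l amount) := by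
      apply List.filter_congr
      intro i hi
      have hi' : i < l.length := List.mem_range.mp hi
      unfold canonF
      rw [(hsame i hi').1, (hsame i hi').2]
    rw [hf]
    apply List.map_congr_left
    intro i hi
    have hi' : i < l.length := List.mem_range.mp (List.mem_of_mem_filter hi)
    exact (hsame i hi').2
  · -- the new position l.length
    have htake : (l ++ [x]).take l.length = l := List.take_left
    have hget : (l ++ [x]).getD l.length 0 = x := by
      rw [List.getD_eq_getElem?_getD]
      simp
    by_cases hc : ((l.count x : Int) < amount)
    · rw [if_pos hc]
      have : canonF (l ++ [x]) amount l.length = true := by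
        unfold canonF; rw [htake, hget]; simpa using hc
      simp [this]
    · rw [if_neg hc]
      have : canonF (l ++ [x]) amount l.length = false := by
        unfold canonF; rw [htake, hget]; simpa using hc
      simp [this]

def stepA (amount : Int) (st : List Int × PySem.Dict Int Int) (item : Int) :
    List Int × PySem.Dict Int Int :=
  let count :=
    if st.2.contains item = false then st.2.insert item 1
    else st.2.insert item (st.2.getD item 0 + 1)
  let updated := if count.getD item 0 ≤ amount then st.1 ++ [item] else st.1
  (updated, count)

theorem stateA_foldl (amount : Int) (l : List Int) :
    (l.foldl (stepA amount) ([], PySem.Dict.empty)).1 = canonMap l amount ∧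
    (∀ v, (l.foldl (stepA amount) ([], PySem.Dict.empty)).2.getD v 0 = (l.count v : Int)) := by
  induction l using List.reverseRecOn with
  | nil =>
    constructor
    · simp [canonMap, canonIdx]
    · intro v; simp [PySem.Dict.getD_empty]
  | append_singleton t x ih =>
    obtain ⟨ih1, ih2⟩ := ih
    rw [List.foldl_append]
    set st := t.foldl (stepA amount) ([], PySem.Dict.empty) with hst
    have hins : (if st.2.contains x = false then st.2.insert x 1
                 else st.2.insert x (st.2.getD x 0 + 1))
        = st.2.insert x (st.2.getD x 0 + 1) := by
      by_cases hc : st.2.contains x = false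
      · rw [if_pos hc, PySem.Dict.getD_of_not_contains st.2 (0:Int) hc]; norm_num
      · rw [if_neg hc]
    have hcnt : (st.2.insert x (st.2.getD x 0 + 1)).getD x 0 = (t.count x : Int) + 1 := by
      rw [PySem.Dict.getD_insert]; simp [ih2 x]
    constructor
    · show (stepA amount st x).1 = _
      unfold stepA
      simp only [hins, hcnt, canonMap_append, ih1]
      by_cases hlt : ((t.count x : Int) < amount)
      · rw [if_pos (by omega), if_pos hlt]
      · rw [if_neg (by omega), if_neg hlt]; simp
    · intro v
      show (stepA amount st x).2.getD v 0 = _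
      unfold stepA
      simp only [hins]
      rw [PySem.Dict.getD_insert]
      by_cases hv : v = x
      · subst hv; simp [ih2 v, List.count_append]
      · simp [hv, ih2 v, List.count_append, Ne.symm hv]

theorem mem_take_filter_range (q : Nat → Bool) (k i : Nat) :
    ∀ n, (i ∈ ((List.range n).filter q).take k
      ↔ (i < n ∧ q i ∧ ((List.range i).filter q).length < k)) := by
  intro n
  induction n with
  | zero => simp
  | succ n ih =>
    rw [List.range_succ, List.filter_append, List.take_append, List.mem_append]
    have hmem_lt : ∀ j, j ∈ ((List.range n).filter q).take k → j < n := by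
      intro j hj
      exact List.mem_range.mp (List.mem_of_mem_filter (List.mem_of_mem_take hj))
    by_cases hq : q n
    · simp only [List.filter_singleton, hq, cond_true]
      by_cases hi : i = n
      · subst hi
        have h1 : i ∉ ((List.range i).filter q).take k := fun h => absurd (hmem_lt i h) (lt_irrefl i)
        have h2 : ([i].take (k - ((List.range i).filter q).length))
            = if ((List.range i).filter q).length < k then [i] else [] := by
          by_cases hk : ((List.range i).filter q).length < k
          · rw [if_pos hk]
            exact List.take_of_length_le (by simp; omega)
          · rw [if_neg hk]
            have : k - ((List.range i).filter q).length = 0 := by omega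
            rw [this, List.take_zero]
        rw [h2]
        by_cases hk : ((List.range i).filter q).length < k
        · simp [hk, hq]
        · simp [hk, h1]
      · have h2 : i ∉ ([n].take (k - ((List.range n).filter q).length)) := by
          intro h
          exact hi (by simpa using List.mem_of_mem_take h)
        simp only [ih, or_iff_left h2]
        constructor
        · rintro ⟨h3, h4, h5⟩; exact ⟨by omega, h4, h5⟩
        · rintro ⟨h3, h4, h5⟩; exact ⟨by omega, h4, h5⟩
    · simp only [List.filter_singleton, hq, cond_false, List.take_nil,
        List.not_mem_nil, or_false, ih]
      constructor
      · rintro ⟨h3, h4, h5⟩; exact ⟨by omega, h4, h5⟩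
      · rintro ⟨h3, h4, h5⟩
        have : i ≠ n := by rintro rfl; rw [h4] at hq; exact hq rfl
        exact ⟨by omega, h4, h5⟩

theorem take_eq_map_range (l : List Int) (i : Nat) (h : i ≤ l.length) :
    l.take i = (List.range i).map (fun j => l.getD j 0) := by
  apply List.ext_getElem
  · simp; omega
  · intro j h1 h2
    simp only [List.getElem_take, List.getElem_map, List.getElem_range,
      List.getD_eq_getElem?_getD]
    rw [List.getElem?_eq_getElem (by simp at h1; omega)]
    simp

theorem count_take_eq_length_filter (l : List Int) (x : Int) (i : Nat) (h : i ≤ l.length) :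
    ((l.take i).count x) = ((List.range i).filter (fun j => decide (l.getD j 0 = x))).length := by
  rw [take_eq_map_range l i h, List.count_eq_countP, List.countP_map]
  rw [← List.countP_eq_length_filter]
  rfl

theorem filterMap_ite_eq_filter_map {α : Type} (p : Nat → Bool) (f : Nat → α) (l : List Nat) :
    l.filterMap (fun i => if p i then some (f i) else none) = (l.filter p).map f := by
  induction l with
  | nil => rfl
  | cons a t ih => by_cases h : p a <;> simp [h, ih]

theorem nodup_flatMap_of (g : Int → Int) (s : List Int) (f : Int → List Int)
    (hs : s.Nodup) (hf : ∀ x, (f x).Nodup) (hg : ∀ x j, j ∈ f x → g j = x) :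
    (s.flatMap f).Nodup := by
  induction s with
  | nil => simp
  | cons a t ih =>
    rw [List.flatMap_cons, List.nodup_append]
    refine ⟨hf a, ih hs.of_cons, ?_⟩
    intro j hj1 j2 hj2 heq
    subst heq
    obtain ⟨y, hy, hjy⟩ := List.mem_flatMap.mp hj2
    have h1 : g j = a := hg a j hj1
    have h2 : g j = y := hg y j hjy
    exact (List.nodup_cons.mp hs).1 (h1 ▸ h2 ▸ hy)

def posB (l : List Int) (x : Int) : List Nat :=
  (List.range l.length).filter (fun i => decide (l.getD i 0 = x))

theorem enum_filter_eq (l : List Int) (x : Int) :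
    (PySem.List.enumerate l 0).filterMap
        (fun p => if p.2 == x then some p.1 else none)
      = (posB l x).map (Nat.cast : Nat → Int) := by
  rw [PySem.List.enumerate_eq_map_pyRange l 0, List.filterMap_map]
  have hlen : PySem.List.len l = ((l.length : Nat) : Int) := by simp [PySem.List.len_eq]
  rw [hlen, PySem.List.pyRange_zero_nat, List.filterMap_map]
  unfold posB
  have hcg : ∀ i ∈ List.range l.length,
      (((fun p => if (p.2 == x) = true then some p.1 else none)
          ∘ fun j => ((j : Int), PySem.List.pyGetD l j 0)) ∘ fun k : Nat => (k : Int)) i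
        = (fun i : Nat => if decide (l.getD i 0 = x) then some ((i : Nat) : Int) else none) i := by
    intro i _
    simp [PySem.List.pyGetD_natCast]
  rw [List.filterMap_congr hcg, filterMap_ite_eq_filter_map]


theorem altB_eq_canonMap (l : List Int) (amount : Int) :
    delete_extra_alt l amount = canonMap l amount := by
  unfold delete_extra_alt
  by_cases hneg : amount ≤ 0
  · rw [if_pos hneg]
    have h0 : canonIdx l amount = [] := by
      unfold canonIdx
      apply List.filter_eq_nil_iff.mpr
      intro i _
      unfold canonF
      simp only [decide_eq_true_eq]
      omega
    simp [canonMap, h0]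
  · rw [if_neg hneg]
    simp only []
    have hpos : 0 < amount := by omega
    set k := amount.toNat with hk
    set S := PySem.List.sorted (PySem.Set.ofList l) (fun v => v) false with hS
    set cI := (canonIdx l amount).map (Nat.cast : Nat → Int) with hcI
    -- the foldl is a flatMap of per-value blocks
    rw [PySem.List.foldl_append_eq_flatMap
      (fun x => PySem.List.slice
        ((PySem.List.enumerate l 0).filterMap
          (fun p => if p.2 == x then some p.1 else none)) none (some amount)) S []]
    rw [List.nil_append]
    have hblock : (fun x => PySem.List.slice
        ((PySem.List.enumerate l 0).filterMap
          (fun p => if p.2 == x then some p.1 else none)) none (some amount))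
      = (fun x => ((posB l x).take k).map (Nat.cast : Nat → Int)) := by
      funext x
      rw [enum_filter_eq, PySem.List.slice_to _ (le_of_lt hpos), ← List.map_take]
    rw [hblock]
    set kept := S.flatMap (fun x => ((posB l x).take k).map (Nat.cast : Nat → Int)) with hkept
    have hSn : S.Nodup := ((PySem.List.sorted_perm _ _ _).symm).nodup (PySem.Set.nodup_ofList l)
    have hposn : ∀ x, (posB l x).Nodup := fun x => (List.nodup_range).filter _
    have hbn : ∀ x, (((posB l x).take k).map (Nat.cast : Nat → Int)).Nodup := by
      intro x
      exact ((hposn x).sublist (List.take_sublist k _)).map Nat.cast_injective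
    have hval : ∀ x j, j ∈ ((posB l x).take k).map (Nat.cast : Nat → Int) →
        (fun j : Int => l.getD j.toNat 0) j = x := by
      intro x j hj
      obtain ⟨i, hi, rfl⟩ := List.mem_map.mp hj
      have : i ∈ posB l x := List.mem_of_mem_take hi
      unfold posB at this
      have := (List.mem_filter.mp this).2
      simp only [decide_eq_true_eq] at this
      simpa using this
    have hKn : kept.Nodup := nodup_flatMap_of (fun j => l.getD j.toNat 0) S _ hSn hbn hval
    have hCn : cI.Nodup := ((List.nodup_range).filter _).map Nat.cast_injective
    have hmemtake : ∀ (x : Int) (i : Nat), i ∈ (posB l x).take k ↔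
        (i < l.length ∧ l.getD i 0 = x ∧ (l.take i).count x < k) := by
      intro x i
      unfold posB
      rw [mem_take_filter_range]
      constructor
      · rintro ⟨h1, h2, h3⟩
        simp only [decide_eq_true_eq] at h2
        refine ⟨h1, h2, ?_⟩
        rw [count_take_eq_length_filter l x i h1.le]
        exact h2 ▸ h3
      · rintro ⟨h1, h2, h3⟩
        refine ⟨h1, by simpa [List.getD_eq_getElem?_getD] using h2, ?_⟩
        rw [count_take_eq_length_filter l x i h1.le] at h3
        exact h2 ▸ h3
    have hmem : ∀ a, a ∈ cI ↔ a ∈ kept := by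
      intro a
      rw [hcI, hkept]
      constructor
      · intro ha
        obtain ⟨i, hi, rfl⟩ := List.mem_map.mp ha
        unfold canonIdx at hi
        have h1 : i < l.length := List.mem_range.mp (List.mem_of_mem_filter hi)
        have h2 : canonF l amount i = true := List.of_mem_filter hi
        unfold canonF at h2
        simp only [decide_eq_true_eq] at h2
        apply List.mem_flatMap.mpr
        refine ⟨l.getD i 0, ?_, ?_⟩
        · rw [hS, PySem.List.mem_sorted, PySem.Set.mem_ofList]
          rw [List.getD_eq_getElem l 0 h1]
          exact List.getElem_mem h1
        · exact List.mem_map.mpr ⟨i, (hmemtake _ i).mpr ⟨h1, rfl, by omega⟩, rfl⟩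
      · intro ha
        obtain ⟨x, _, hax⟩ := List.mem_flatMap.mp ha
        obtain ⟨i, hi, rfl⟩ := List.mem_map.mp hax
        obtain ⟨h1, h2, h3⟩ := (hmemtake x i).mp hi
        apply List.mem_map.mpr
        refine ⟨i, ?_, rfl⟩
        unfold canonIdx
        apply List.mem_filter.mpr
        refine ⟨List.mem_range.mpr h1, ?_⟩
        unfold canonF
        simp only [decide_eq_true_eq]
        rw [h2]
        omega
    have hpair : cI.Pairwise (· < ·) := by
      rw [hcI]
      apply List.Pairwise.map
      · intro a b hab
        exact_mod_cast hab
      · exact (List.pairwise_lt_range).filter _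
    have hperm : cI.Perm kept := (List.perm_ext_iff_of_nodup hCn hKn).mpr hmem
    rw [PySem.List.sorted_eq_of_perm_of_pairwise_lt kept cI (fun v => v) hperm hpair]
    rw [hcI, List.map_map]
    unfold canonMap
    apply List.map_congr_left
    intro i hi
    have h1 : i < l.length := List.mem_range.mp (List.mem_of_mem_filter hi)
    simp [PySem.List.pyGet?_natCast, List.getD_eq_getElem?_getD]

-- ===== VERDICT (by name: the statement is the Claim_ definition above) =====
theorem delete_extra_spec : Claim_equal_delete_extra := by
  intro alist amount _
  unfold Spec_delete_extra
  have hA : delete_extra alist amount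
      = (alist.foldl (stepA amount) ([], PySem.Dict.empty)).1 := rfl
  rw [hA, (stateA_foldl amount alist).1, altB_eq_canonMap]
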